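-- pv_equiv track=rewrite | github.com/jackstenglein/pdf-font-remover | pdf_objects.py | Canonicalize
-- ===== SOURCE A (Python) =====
-- def Canonicalize(sIn):
--     if sIn == '':
--         return sIn
--     elif sIn[0] != '/':
--         return sIn
--     elif sIn.find('#') == -1:
--         return sIn
--     else:
--         i = 0
--         iLen = len(sIn)
--         sCanonical = ''
--         while i < iLen:
--             if sIn[i] == '#' and i < iLen - 2:
--                 try:
--                     sCanonical += chr(int(sIn[i+1:i+3], 16))
--                     i += 2
--                 except:
--                     sCanonical += sIn[i]
--             else:
--                 sCanonical += sIn[i]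
--             i += 1
--         return sCanonical
-- ===== SOURCE B (Python) =====
-- def Canonicalize(sIn):
--     if sIn == '':
--         return sIn
--     elif sIn[0] != '/':
--         return sIn
--     elif sIn.find('#') == -1:
--         return sIn
--     else:
--         parts = []
--         i = 0
--         n = len(sIn)
--         while True:
--             j = sIn.find('#', i)
--             if j == -1:
--                 parts.append(sIn[i:])
--                 break
--             parts.append(sIn[i:j])
--             if j < n - 2:
--                 try:
--                     parts.append(chr(int(sIn[j+1:j+3], 16)))
--                     i = j + 3
--                 except:
--                     parts.append('#')
--                     i = j + 1
--             else:
--                 parts.append('#')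
--                 i = j + 1
--         return ''.join(parts)
-- ===== Notes on version B (the rewrite author's own statement) =====
-- stated objective: alternative
-- what changed: A decodes with a per-character index loop appending one char at a time; B repeatedly finds the next '#', appends the whole literal slice before it plus the decoded escape to a parts list, and joins once at the end.
import Mathlib
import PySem

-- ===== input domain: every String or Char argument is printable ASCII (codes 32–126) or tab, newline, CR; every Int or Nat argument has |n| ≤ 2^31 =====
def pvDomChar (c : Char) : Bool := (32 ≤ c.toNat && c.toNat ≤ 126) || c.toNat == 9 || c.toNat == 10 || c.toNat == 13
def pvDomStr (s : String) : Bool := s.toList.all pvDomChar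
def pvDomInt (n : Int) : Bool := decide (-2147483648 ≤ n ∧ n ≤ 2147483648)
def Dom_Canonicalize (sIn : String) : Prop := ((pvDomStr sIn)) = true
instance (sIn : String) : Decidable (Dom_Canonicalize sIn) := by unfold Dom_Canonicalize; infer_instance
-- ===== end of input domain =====

-- B replaces A's per-character while loop by a '#'-seeking scan that copies whole literal
-- chunks and joins a list of pieces (objective: alternative decomposition, same cost).

-- ===== PORT A =====

-- value of c as a hex digit (the digits int(·,16) accepts); exact on Dom chars
def hexVal? (c : Char) : Option Nat :=
  if '0' ≤ c ∧ c ≤ '9' then some (c.toNat - '0'.toNat)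
  else if 'a' ≤ c ∧ c ≤ 'f' then some (c.toNat - 'a'.toNat + 10)
  else if 'A' ≤ c ∧ c ≤ 'F' then some (c.toNat - 'A'.toNat + 10)
  else none

-- Python whitespace among Dom chars (space, tab, newline, CR)
def isPySpace (c : Char) : Bool := c = ' ' || c = '\t' || c = '\n' || c = '\r'

-- the char produced by `chr(int(sIn[i+1:i+3], 16))`, none where that try-block raises;
-- exact for two Dom chars: int(·,16) allows surrounding whitespace and a leading '+',
-- while a leading '-' parses but then makes chr raise
def tryDecode (a b : Char) : Option Char :=
  match hexVal? a, hexVal? b with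
  | some x, some y => some (Char.ofNat (16 * x + y))
  | _, _ =>
    if isPySpace a then (hexVal? b).map Char.ofNat
    else if isPySpace b then (hexVal? a).map Char.ofNat
    else if a = '+' then (hexVal? b).map Char.ofNat
    else none

-- A's while loop, step for step: the index i becomes the list of remaining characters
-- (the '#'-with-two-following-chars guard `i < iLen - 2` is the a :: b :: t' shape),
-- sCanonical the accumulator
def goA (cs : List Char) (acc : List Char) : List Char :=
  match cs with
  | [] => acc
  | c :: t =>
    if c = '#' then
      match t with
      | a :: b :: t' =>
        match tryDecode a b with
        | some ch => goA t' (acc ++ [ch])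
        | none => goA (a :: b :: t') (acc ++ [c])
      | t2 => goA t2 (acc ++ [c])
    else goA t (acc ++ [c])
termination_by cs.length
decreasing_by all_goals (simp only [List.length_cons]; omega)

def Canonicalize (sIn : String) : String :=
  if sIn = "" then sIn
  else if sIn.toList.headD ' ' ≠ '/' then sIn
  else if ¬ sIn.toList.contains '#' then sIn
  else String.ofList (goA sIn.toList [])

-- ===== PORT B =====

-- B's find-based scan: emit the whole literal chunk up to the next '#' at once,
-- handle that escape, recurse on what follows
def goB (cs : List Char) : List (List Char) :=
  let pre := cs.takeWhile (· ≠ '#')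
  match h : cs.dropWhile (· ≠ '#') with
  | [] => [pre]
  | _ :: t =>
    match t with
    | a :: b :: t' =>
      match tryDecode a b with
      | some ch => pre :: [ch] :: goB t'
      | none => pre :: ['#'] :: goB (a :: b :: t')
    | t2 => pre :: ['#'] :: goB t2
termination_by cs.length
decreasing_by all_goals
  (have h2 := List.length_dropWhile_le (p := fun x => decide (x ≠ '#')) (l := cs);
   have h3 := congrArg List.length h;
   simp only [List.length_cons] at h3 ⊢; omega)

def Canonicalize_alt (sIn : String) : String :=
  if sIn = "" then sIn
  else if sIn.toList.headD ' ' ≠ '/' then sIn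
  else if ¬ sIn.toList.contains '#' then sIn
  else String.ofList (goB sIn.toList).flatten

-- ===== PRECONDITION & SPEC =====
def Spec_Canonicalize (sIn : String) (out : String) : Prop := out = Canonicalize_alt sIn
instance (sIn : String) (out : String) : Decidable (Spec_Canonicalize sIn out) := by unfold Spec_Canonicalize; infer_instance

-- ===== CLAIM (what is proved, stated in full; the proofs are below) =====
def Claim_equal_Canonicalize : Prop := ∀ (sIn : String), Dom_Canonicalize sIn → Spec_Canonicalize sIn (Canonicalize sIn)

-- ===== LEMMAS AND PROOFS =====

-- one literal step of A's loop
theorem goA_cons (c : Char) (t : List Char) (acc : List Char) (hc : c ≠ '#') :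
    goA (c :: t) acc = goA t (acc ++ [c]) := by
  rw [goA.eq_def]
  simp [hc]

-- A's loop copies a '#'-free prefix verbatim
theorem goA_literal (pre : List Char) (hp : ∀ c ∈ pre, c ≠ '#') (t : List Char) (acc : List Char) :
    goA (pre ++ t) acc = goA t (acc ++ pre) := by
  induction pre generalizing acc with
  | nil => simp
  | cons c pre ih =>
    rw [List.cons_append, goA_cons _ _ _ (hp c (by simp)),
        ih (fun d hd => hp d (by simp [hd]))]
    simp

-- A's step at a '#' with at least two following characters
theorem goA_hash_long (a b : Char) (t' : List Char) (acc : List Char) :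
    goA ('#' :: a :: b :: t') acc =
      match tryDecode a b with
      | some ch => goA t' (acc ++ [ch])
      | none => goA (a :: b :: t') (acc ++ ['#']) := by
  rw [goA.eq_def]
  rfl

-- A's step at a '#' with fewer than two following characters
theorem goA_hash_short (t2 : List Char) (acc : List Char)
    (hs : ∀ (a b : Char) (t' : List Char), t2 ≠ a :: b :: t') :
    goA ('#' :: t2) acc = goA t2 (acc ++ ['#']) := by
  rw [goA.eq_def]
  cases t2 with
  | nil => rfl
  | cons x t3 =>
    cases t3 with
    | nil => rfl
    | cons y t4 => exact absurd rfl (hs x y t4)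

-- the first dropped character is '#'
theorem dropWhile_head_hash (cs : List Char) (r : Char) (t : List Char)
    (h : cs.dropWhile (fun c => decide (c ≠ '#')) = r :: t) : r = '#' := by
  induction cs with
  | nil => simp at h
  | cons c cs ih =>
    rw [List.dropWhile_cons] at h
    by_cases hc : c = '#'
    · subst hc
      simp at h
      exact h.1.symm
    · rw [if_pos (by simp [hc])] at h
      exact ih h

-- every kept prefix character is a literal
theorem takeWhile_no_hash (cs : List Char) :
    ∀ c ∈ cs.takeWhile (fun c => decide (c ≠ '#')), c ≠ '#' := by
  intro c hc
  simpa using List.mem_takeWhile_imp hc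

-- cs splits as its literal prefix followed by the dropped part
theorem split_at_hash (cs : List Char) (r : List Char)
    (h : cs.dropWhile (fun c => decide (c ≠ '#')) = r) :
    cs = cs.takeWhile (fun c => decide (c ≠ '#')) ++ r := by
  conv_lhs => rw [← List.takeWhile_append_dropWhile (p := fun c => decide (c ≠ '#')) (l := cs)]
  rw [h]

-- B takes one chunk where the input has no further '#'
theorem goB_nil (cs : List Char)
    (h : cs.dropWhile (fun c => decide (c ≠ '#')) = []) :
    goB cs = [cs.takeWhile (fun c => decide (c ≠ '#'))] := by
  rw [goB.eq_def]
  split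
  · rfl
  · rename_i r t h2
    rw [h] at h2
    simp at h2

-- B's step at a '#' with at least two following characters
theorem goB_long (cs : List Char) (a b : Char) (t' : List Char)
    (h : cs.dropWhile (fun c => decide (c ≠ '#')) = '#' :: a :: b :: t') :
    goB cs = cs.takeWhile (fun c => decide (c ≠ '#')) ::
      (match tryDecode a b with
       | some ch => [ch] :: goB t'
       | none => ['#'] :: goB (a :: b :: t')) := by
  rw [goB.eq_def]
  split
  · rename_i h2
    rw [h] at h2
    simp at h2
  · rename_i r t h2
    rw [h] at h2
    injection h2 with e1 e2
    subst e1; subst e2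
    split
    · rename_i heq hhe
      injection heq with f1 heq
      injection heq with f2 f3
      subst f1; subst f2; subst f3
      cases tryDecode a b <;> rfl
    · cases tryDecode a b <;> rfl

-- B's step at a '#' with fewer than two following characters
theorem goB_short (cs : List Char) (t2 : List Char)
    (h : cs.dropWhile (fun c => decide (c ≠ '#')) = '#' :: t2)
    (hs : ∀ (a b : Char) (t' : List Char), t2 ≠ a :: b :: t') :
    goB cs = cs.takeWhile (fun c => decide (c ≠ '#')) :: ['#'] :: goB t2 := by
  rw [goB.eq_def]
  split
  · rename_i h2
    rw [h] at h2
    simp at h2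
  · rename_i r t h2
    rw [h] at h2
    injection h2 with e1 e2
    subst e1; subst e2
    split
    · exact absurd rfl (hs _ _ _)
    · rfl

-- A's loop equals B's chunk scan
theorem goA_eq_flatten (cs : List Char) (acc : List Char) :
    goA cs acc = acc ++ (goB cs).flatten := by
  induction cs using goB.induct generalizing acc with
  | case1 cs h =>
    conv_lhs => rw [split_at_hash cs [] h]
    rw [goA_literal _ (takeWhile_no_hash cs), goB_nil cs h]
    simp [goA]
  | case2 cs hd a b t' h ch hch h' ih =>
    have e := dropWhile_head_hash cs hd _ h
    subst e
    conv_lhs => rw [split_at_hash cs _ h]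
    rw [goA_literal _ (takeWhile_no_hash cs), goA_hash_long]
    rw [goB_long cs a b t' h]
    simp only [hch]
    rw [ih]
    simp
  | case3 cs hd a b t' h hch h' ih =>
    have e := dropWhile_head_hash cs hd _ h
    subst e
    conv_lhs => rw [split_at_hash cs _ h]
    rw [goA_literal _ (takeWhile_no_hash cs), goA_hash_long]
    rw [goB_long cs a b t' h]
    simp only [hch]
    rw [ih]
    simp
  | case4 cs hd t2 h hshort h' ih =>
    have e := dropWhile_head_hash cs hd _ h
    subst e
    have ht2 : ∀ (a b : Char) (t' : List Char), t2 ≠ a :: b :: t' := by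
      intro a b t' he
      subst he
      exact hshort a b t' h rfl HEq.rfl
    conv_lhs => rw [split_at_hash cs _ h]
    rw [goA_literal _ (takeWhile_no_hash cs), goA_hash_short _ _ ht2]
    rw [goB_short cs t2 h ht2]
    rw [ih]
    simp

-- ===== VERDICT (by name: the statement is the Claim_ definition above) =====
theorem Canonicalize_spec : Claim_equal_Canonicalize := by
  intro sIn _
  unfold Spec_Canonicalize Canonicalize Canonicalize_alt
  split_ifs <;> first | rfl | (rw [goA_eq_flatten]; simp)
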